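-- pv_equiv track=rewrite | github.com/bozicschucky/automata_and_complexity- | no_consecutive_ones.py | no_consecutive_ones
-- ===== SOURCE A (Python) =====
-- def no_consecutive_ones(s):
--     start = "s"
--
--     for i in range(len(s)):
--         if start == "s" and s[i] == "1":
--             start = "1"
--         elif start == "1" and s[i] == "1":
--             return False
--         elif s[i] == "0":
--             start = "s"
--
--     return True
-- ===== SOURCE B (Python) =====
-- def no_consecutive_ones(s):
--     return all(seg.count("1") < 2 for seg in s.split("0"))
-- ===== Notes on version B (the rewrite author's own statement) =====
-- stated objective: idiomatic
-- what changed: Replaces the per-character three-state DFA loop with a split-then-count decomposition: the string is split on the zero character and the answer is True iff every resulting segment contains fewer than two one characters.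
import Mathlib
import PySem

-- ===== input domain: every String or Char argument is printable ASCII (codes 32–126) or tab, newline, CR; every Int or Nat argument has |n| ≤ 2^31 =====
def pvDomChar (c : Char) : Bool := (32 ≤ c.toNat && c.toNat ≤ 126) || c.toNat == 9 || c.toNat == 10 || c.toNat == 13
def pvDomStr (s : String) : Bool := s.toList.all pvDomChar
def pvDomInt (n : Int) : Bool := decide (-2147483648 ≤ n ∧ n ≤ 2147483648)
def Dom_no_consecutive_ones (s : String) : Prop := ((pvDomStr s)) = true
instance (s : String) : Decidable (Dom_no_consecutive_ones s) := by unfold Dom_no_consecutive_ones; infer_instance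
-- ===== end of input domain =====

-- B replaces A's per-character three-state scan with split-on-"0" + a count of '1's per segment (idiomatic; a timing run measured it faster by a constant factor: C-level str.split/str.count vs an interpreted per-character loop).

-- ===== PORT A =====
-- A's for-loop over range(len(s)) reading s[i] in order, with state `start` and an early `return False`.
def noConsecutiveOnesLoopA (start : String) : List Char → Bool
  | [] => true
  | c :: rest =>
    if start == "s" && c == '1' then noConsecutiveOnesLoopA "1" rest
    else if start == "1" && c == '1' then false
    else if c == '0' then noConsecutiveOnesLoopA "s" rest
    else noConsecutiveOnesLoopA start rest

def no_consecutive_ones (s : String) : Bool := noConsecutiveOnesLoopA "s" s.toList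

-- ===== PORT B =====
-- Source B: all(seg.count("1") < 2 for seg in s.split("0"))  (split? is some: the separator "0" is non-empty)
def no_consecutive_ones_alt (s : String) : Bool :=
  ((PySem.Str.split? s "0").getD []).all (fun seg => decide (PySem.Str.count seg "1" < 2))

-- ===== PRECONDITION & SPEC =====
def Spec_no_consecutive_ones (s : String) (out : Bool) : Prop := out = no_consecutive_ones_alt s
instance (s : String) (out : Bool) : Decidable (Spec_no_consecutive_ones s out) := by unfold Spec_no_consecutive_ones; infer_instance

-- ===== CLAIM (what is proved, stated in full; the proofs are below) =====
def Claim_equal_no_consecutive_ones : Prop := ∀ (s : String), Dom_no_consecutive_ones s → Spec_no_consecutive_ones s (no_consecutive_ones s)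

-- ===== LEMMAS AND PROOFS =====

-- s.count("1") counts single characters: Chars.count with sub = ['1'] is List.count '1'.
theorem pvCountGoOne (fuel : Nat) (l : List Char) (acc : Nat) (h : l.length ≤ fuel) :
    PySem.Chars.count.go ['1'] fuel l acc = acc + l.count '1' := by
  induction fuel generalizing l acc with
  | zero =>
    cases l with
    | nil => simp [PySem.Chars.count.go]
    | cons c t => simp at h
  | succ fuel ih =>
    cases l with
    | nil => simp [PySem.Chars.count.go]
    | cons c t =>
      simp only [List.length_cons, Nat.succ_le_succ_iff] at h
      by_cases hc : c = '1'
      · subst hc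
        rw [show PySem.Chars.count.go ['1'] (fuel + 1) ('1' :: t) acc
              = PySem.Chars.count.go ['1'] fuel t (acc + 1) by
            simp [PySem.Chars.count.go, List.isPrefixOf]]
        rw [ih t (acc + 1) h]
        simp [List.count_cons]
        omega
      · rw [show PySem.Chars.count.go ['1'] (fuel + 1) (c :: t) acc
              = PySem.Chars.count.go ['1'] fuel t acc by
            simp [PySem.Chars.count.go, List.isPrefixOf, hc, (Ne.symm hc)]]
        rw [ih t acc h]
        simp [List.count_cons, hc]

theorem pvCountOne (l : List Char) : PySem.Chars.count l ['1'] = l.count '1' := by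
  have h := pvCountGoOne l.length l 0 (le_refl _)
  simp [PySem.Chars.count, h]

-- structural reference version of splitOn on the single-character separator '0'
def pvSplitRec (cur : List Char) : List Char → List (List Char)
  | [] => [cur.reverse]
  | c :: t => if c = '0' then cur.reverse :: pvSplitRec [] t else pvSplitRec (c :: cur) t

theorem pvSplitGo (fuel : Nat) (l cur : List Char) (acc : List (List Char)) (h : l.length ≤ fuel) :
    PySem.Chars.splitOn.go ['0'] fuel l cur acc = acc.reverse ++ pvSplitRec cur l := by
  induction fuel generalizing l cur acc with
  | zero =>
    cases l with
    | nil => simp [PySem.Chars.splitOn.go, pvSplitRec]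
    | cons c t => simp at h
  | succ fuel ih =>
    cases l with
    | nil => simp [PySem.Chars.splitOn.go, pvSplitRec]
    | cons c t =>
      simp only [List.length_cons, Nat.succ_le_succ_iff] at h
      by_cases hc : c = '0'
      · subst hc
        rw [show PySem.Chars.splitOn.go ['0'] (fuel + 1) ('0' :: t) cur acc
              = PySem.Chars.splitOn.go ['0'] fuel t [] (cur.reverse :: acc) by
            simp [PySem.Chars.splitOn.go, List.isPrefixOf]]
        rw [ih t [] (cur.reverse :: acc) h]
        simp [pvSplitRec]
      · rw [show PySem.Chars.splitOn.go ['0'] (fuel + 1) (c :: t) cur acc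
              = PySem.Chars.splitOn.go ['0'] fuel t (c :: cur) acc by
            simp [PySem.Chars.splitOn.go, List.isPrefixOf, hc, (Ne.symm hc)]]
        rw [ih t (c :: cur) acc h]
        simp [pvSplitRec, hc]

theorem pvSplitOnEq (l : List Char) : PySem.Chars.splitOn l ['0'] = pvSplitRec [] l := by
  unfold PySem.Chars.splitOn
  rw [pvSplitGo (l.length + 1) l [] [] (by omega)]
  simp

-- the first segment extends cur: its '1'-count dominates cur's
theorem pvHeadCount (l cur : List Char) :
    cur.count '1' ≤ ((pvSplitRec cur l).headI).count '1' := by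
  induction l generalizing cur with
  | nil => simp [pvSplitRec]
  | cons c t ih =>
    by_cases hc : c = '0'
    · subst hc; simp [pvSplitRec]
    · simp only [pvSplitRec, if_neg hc]
      calc cur.count '1' ≤ (c :: cur).count '1' := by
            rw [List.count_cons]; omega
        _ ≤ _ := ih (c :: cur)

theorem pvSplitRecNeNil (l cur : List Char) : pvSplitRec cur l ≠ [] := by
  cases l with
  | nil => simp [pvSplitRec]
  | cons c t =>
    by_cases hc : c = '0'
    · subst hc; simp [pvSplitRec]
    · simp only [pvSplitRec, if_neg hc]
      exact pvSplitRecNeNil t (c :: cur)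

-- main invariant: A's DFA state is the '1'-count of the current (reversed) segment prefix
theorem pvMain (l cur : List Char) (h : cur.count '1' ≤ 1) :
    noConsecutiveOnesLoopA (if cur.count '1' = 1 then "1" else "s") l
      = (pvSplitRec cur l).all (fun seg => decide (seg.count '1' < 2)) := by
  induction l generalizing cur with
  | nil =>
    split <;> simp [noConsecutiveOnesLoopA, pvSplitRec] <;> omega
  | cons c t ih =>
    by_cases hc0 : c = '0'
    · subst hc0
      have hr : noConsecutiveOnesLoopA (if cur.count '1' = 1 then "1" else "s") ('0' :: t)
          = noConsecutiveOnesLoopA "s" t := by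
        split <;> simp [noConsecutiveOnesLoopA]
      rw [hr, show noConsecutiveOnesLoopA "s" t
            = (pvSplitRec [] t).all (fun seg => decide (seg.count '1' < 2)) by
          simpa using ih [] (by simp)]
      simp only [pvSplitRec, if_pos rfl, List.all_cons]
      simp
      exact fun _ => h
    · by_cases hc1 : c = '1'
      · subst hc1
        by_cases hcur : cur.count '1' = 1
        · -- second '1' in the segment: A returns False, the head segment has count ≥ 2
          have hA : noConsecutiveOnesLoopA (if cur.count '1' = 1 then "1" else "s") ('1' :: t)
              = false := by
            rw [if_pos hcur]; simp [noConsecutiveOnesLoopA]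
          rw [hA]
          have h2 : 2 ≤ (('1' :: cur).count '1') := by
            rw [List.count_cons, hcur]; simp
          have hhead := pvHeadCount t ('1' :: cur)
          have hbig : ¬ (((pvSplitRec ('1' :: cur) t).headI).count '1' < 2) := by omega
          simp only [pvSplitRec, if_neg (by decide : ¬ ('1' : Char) = '0')]
          cases hsp : pvSplitRec ('1' :: cur) t with
          | nil => exact absurd hsp (pvSplitRecNeNil t ('1' :: cur))
          | cons a rest =>
            rw [hsp] at hbig
            simp only [List.headI] at hbig
            simp only [List.all_cons,
              show (decide (a.count '1' < 2)) = false by simpa using hbig]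
            simp
        · -- first '1' of the segment
          have hA : noConsecutiveOnesLoopA (if cur.count '1' = 1 then "1" else "s") ('1' :: t)
              = noConsecutiveOnesLoopA "1" t := by
            rw [if_neg hcur]; simp [noConsecutiveOnesLoopA]
          rw [hA]
          have hcur0 : cur.count '1' = 0 := by omega
          have h1 : ('1' :: cur).count '1' = 1 := by
            rw [List.count_cons, hcur0]; simp
          have hih := ih ('1' :: cur) (le_of_eq h1)
          rw [if_pos h1] at hih
          rw [hih]
          simp [pvSplitRec]
      · -- other character: state and count unchanged
        have hA : noConsecutiveOnesLoopA (if cur.count '1' = 1 then "1" else "s") (c :: t)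
            = noConsecutiveOnesLoopA (if cur.count '1' = 1 then "1" else "s") t := by
          split <;> simp [noConsecutiveOnesLoopA, hc0, hc1]
        rw [hA]
        have hcnt : (c :: cur).count '1' = cur.count '1' := by
          rw [List.count_cons]; simp; exact hc1
        have hih := ih (c :: cur) (by rw [hcnt]; exact h)
        rw [hcnt] at hih
        rw [hih]
        simp [pvSplitRec, hc0]

-- ===== VERDICT (by name: the statement is the Claim_ definition above) =====
theorem no_consecutive_ones_spec : Claim_equal_no_consecutive_ones := by
  intro s _
  unfold Spec_no_consecutive_ones no_consecutive_ones no_consecutive_ones_alt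
  rw [show PySem.Str.split? s "0"
        = some ((PySem.Chars.splitOn s.toList ['0']).map String.ofList) by
      simp [PySem.Str.split?, PySem.Chars.split?]]
  simp only [Option.getD_some, List.all_map, pvSplitOnEq]
  have := pvMain s.toList [] (by simp)
  simp only [List.count_nil, if_neg (by omega : ¬ (0 : Nat) = 1)] at this
  rw [this]
  congr 1
  funext seg
  simp [Function.comp, PySem.Str.count, pvCountOne]
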